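-- pv_equiv track=rewrite | github.com/VinylStage/horror-story-generator | src/infra/webhook.py | is_discord_webhook_url
-- ===== SOURCE A (Python) =====
-- def is_discord_webhook_url(url: str) -> bool:
--     """
--     Check if URL is a Discord webhook URL.
--
--     Args:
--         url: Webhook URL to check
--
--     Returns:
--         True if URL matches Discord webhook pattern
--     """
--     if not url:
--         return False
--     # Check for exact domain match (with or without www)
--     discord_patterns = [
--         "https://discord.com/api/webhooks/",
--         "https://www.discord.com/api/webhooks/",
--         "https://discordapp.com/api/webhooks/",
--         "https://www.discordapp.com/api/webhooks/",
--     ]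
--     return any(url.startswith(pattern) for pattern in discord_patterns)
-- ===== SOURCE B (Python) =====
-- def is_discord_webhook_url(url: str) -> bool:
--     """
--     Check if URL is a Discord webhook URL.
--
--     Decomposed check: require the https scheme, strip it, strip one optional
--     leading 'www.', then test the two accepted host+path prefixes.
--     """
--     if not url.startswith("https://"):
--         return False
--     rest = url[8:]
--     if rest.startswith("www."):
--         rest = rest[4:]
--     return rest.startswith("discord.com/api/webhooks/") or rest.startswith("discordapp.com/api/webhooks/")
-- ===== Notes on version B (the rewrite author's own statement) =====
-- stated objective: idiomatic
-- what changed: B decomposes the URL (require 'https://', slice it off, strip one optional 'www.', then test the two host prefixes) instead of enumerating four literal prefixes with any().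
import Mathlib
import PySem

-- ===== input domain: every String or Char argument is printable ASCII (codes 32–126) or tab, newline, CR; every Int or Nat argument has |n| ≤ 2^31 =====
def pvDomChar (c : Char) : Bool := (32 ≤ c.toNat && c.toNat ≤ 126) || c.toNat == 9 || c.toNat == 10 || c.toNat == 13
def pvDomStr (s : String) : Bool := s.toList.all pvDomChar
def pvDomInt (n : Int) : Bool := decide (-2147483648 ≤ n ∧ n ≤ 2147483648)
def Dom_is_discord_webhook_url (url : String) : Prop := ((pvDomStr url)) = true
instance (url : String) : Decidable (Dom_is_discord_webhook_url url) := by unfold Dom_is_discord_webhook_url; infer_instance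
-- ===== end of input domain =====

-- B decomposes the URL (scheme, optional 'www.', then two host prefixes) instead of
-- enumerating four literal prefixes; objective: more idiomatic, same cost.


-- ===== PORT A =====
def is_discord_webhook_url (url : String) : Bool :=
  if url = "" then false
  else
    let discord_patterns : List String :=
      [ "https://discord.com/api/webhooks/",
        "https://www.discord.com/api/webhooks/",
        "https://discordapp.com/api/webhooks/",
        "https://www.discordapp.com/api/webhooks/" ]
    discord_patterns.any (fun pattern => PySem.Str.startswith url pattern)

-- ===== PORT B =====
def is_discord_webhook_url_alt (url : String) : Bool :=
  if ¬ (PySem.Str.startswith url "https://") then false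
  else
    let rest := PySem.Str.slice url (some 8) none
    let rest := if PySem.Str.startswith rest "www." then PySem.Str.slice rest (some 4) none else rest
    PySem.Str.startswith rest "discord.com/api/webhooks/" ||
      PySem.Str.startswith rest "discordapp.com/api/webhooks/"

-- ===== PRECONDITION & SPEC =====
def Spec_is_discord_webhook_url (url : String) (out : Bool) : Prop := out = is_discord_webhook_url_alt url
instance (url : String) (out : Bool) : Decidable (Spec_is_discord_webhook_url url out) := by unfold Spec_is_discord_webhook_url; infer_instance

-- ===== CLAIM (what is proved, stated in full; the proofs are below) =====
def Claim_equal_is_discord_webhook_url : Prop := ∀ (url : String), Dom_is_discord_webhook_url url → Spec_is_discord_webhook_url url (is_discord_webhook_url url)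

-- ===== LEMMAS AND PROOFS =====

-- (p ++ q) is a prefix of l iff p is, and q is a prefix of what remains after p.
theorem pv_append_prefix_iff (p q l : List Char) :
    (p ++ q) <+: l ↔ p <+: l ∧ q <+: l.drop p.length := by
  constructor
  · rintro ⟨t, rfl⟩
    refine ⟨⟨q ++ t, by simp⟩, ?_⟩
    simp
  · rintro ⟨hp, hq⟩
    obtain ⟨t, rfl⟩ := hp
    obtain ⟨u, hu⟩ := hq
    simp at hu
    exact ⟨u, by simp [hu]⟩

-- two prefixes of the same list with different first characters cannot coexist
theorem pv_prefix_disjoint {a b : Char} {p q l : List Char} (hne : a ≠ b)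
    (hp : (a :: p) <+: l) (hq : (b :: q) <+: l) : False := by
  obtain ⟨t, rfl⟩ := hp
  obtain ⟨u, hu⟩ := hq
  simp [List.cons_append] at hu
  exact hne hu.1.symm

-- ===== VERDICT (by name: the statement is the Claim_ definition above) =====
theorem is_discord_webhook_url_spec : Claim_equal_is_discord_webhook_url := by
  intro url _
  unfold Spec_is_discord_webhook_url is_discord_webhook_url is_discord_webhook_url_alt
  by_cases hempty : url = ""
  · subst hempty
    decide
  · simp only [if_neg hempty, List.any_cons, List.any_nil, Bool.or_false]
    -- move everything to lists of chars
    simp only [PySem.Str.startswith_eq, PySem.Str.toList_slice, PySem.Chars.slice_eq_listSlice]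
    rw [show ((some (8 : Int)) = some ((8 : Nat) : Int)) from rfl,
        show ((some (4 : Int)) = some ((4 : Nat) : Int)) from rfl]
    have hs8 := PySem.List.slice_from_natCast (xs := url.toList) (a := 8)
    set l := url.toList with hl
    by_cases hh : PySem.Chars.startswith l "https://".toList = true
    case neg =>
      -- no https prefix: all four patterns fail and B returns false
      have hforall : ∀ (q : List Char),
          PySem.Chars.startswith l ("https://".toList ++ q) = false := by
        intro q
        rw [← Bool.not_eq_true, PySem.Chars.startswith_iff, pv_append_prefix_iff]
        intro ⟨h1, _⟩
        exact hh (by rw [PySem.Chars.startswith_iff]; exact h1)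
      rw [show ("https://discord.com/api/webhooks/".toList)
            = "https://".toList ++ "discord.com/api/webhooks/".toList from rfl,
          show ("https://www.discord.com/api/webhooks/".toList)
            = "https://".toList ++ "www.discord.com/api/webhooks/".toList from rfl,
          show ("https://discordapp.com/api/webhooks/".toList)
            = "https://".toList ++ "discordapp.com/api/webhooks/".toList from rfl,
          show ("https://www.discordapp.com/api/webhooks/".toList)
            = "https://".toList ++ "www.discordapp.com/api/webhooks/".toList from rfl,
          hforall, hforall, hforall, hforall, if_pos hh]
      rfl
    case pos =>
      have hhs : "https://".toList <+: l := (PySem.Chars.startswith_iff _ _).mp hh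
      obtain ⟨r, hr⟩ := hhs
      have hdrop8 : l.drop 8 = r := by rw [← hr]; simp
      have hsplit : ∀ (q : List Char),
          PySem.Chars.startswith l ("https://".toList ++ q) = PySem.Chars.startswith r q := by
        intro q
        rcases hb : PySem.Chars.startswith r q with _ | _
        · rw [← Bool.not_eq_true, PySem.Chars.startswith_iff, pv_append_prefix_iff]
          intro ⟨_, h2⟩
          rw [show ("https://".toList.length) = 8 from rfl, hdrop8] at h2
          rw [← Bool.not_eq_true, PySem.Chars.startswith_iff] at hb
          exact hb h2
        · rw [PySem.Chars.startswith_iff, pv_append_prefix_iff]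
          refine ⟨⟨r, hr⟩, ?_⟩
          rw [show ("https://".toList.length) = 8 from rfl, hdrop8]
          exact (PySem.Chars.startswith_iff _ _).mp hb
      rw [show ("https://discord.com/api/webhooks/".toList)
            = "https://".toList ++ "discord.com/api/webhooks/".toList from rfl,
          show ("https://www.discord.com/api/webhooks/".toList)
            = "https://".toList ++ "www.discord.com/api/webhooks/".toList from rfl,
          show ("https://discordapp.com/api/webhooks/".toList)
            = "https://".toList ++ "discordapp.com/api/webhooks/".toList from rfl,
          show ("https://www.discordapp.com/api/webhooks/".toList)
            = "https://".toList ++ "www.discordapp.com/api/webhooks/".toList from rfl,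
          hsplit, hsplit, hsplit, hsplit, hh, if_neg (fun h => h rfl),
          hs8, hdrop8]
      by_cases hw : PySem.Chars.startswith r "www.".toList = true
      case pos =>
        rw [if_pos hw]
        simp only [PySem.Str.toList_slice, PySem.Chars.slice_eq_listSlice]
        rw [hs8, hdrop8]
        have hs4' : PySem.List.slice r (some ((4 : Nat) : Int)) none = r.drop 4 :=
          PySem.List.slice_from_natCast (xs := r) (a := 4)
        obtain ⟨r2, hr2⟩ := (PySem.Chars.startswith_iff _ _).mp hw
        have hdrop4 : r.drop 4 = r2 := by rw [← hr2]; simp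
        have hww : ∀ (q : List Char),
            PySem.Chars.startswith r ("www.".toList ++ q) = PySem.Chars.startswith r2 q := by
          intro q
          rcases hb : PySem.Chars.startswith r2 q with _ | _
          · rw [← Bool.not_eq_true, PySem.Chars.startswith_iff, pv_append_prefix_iff]
            intro ⟨_, h2⟩
            rw [show ("www.".toList.length) = 4 from rfl, hdrop4] at h2
            rw [← Bool.not_eq_true, PySem.Chars.startswith_iff] at hb
            exact hb h2
          · rw [PySem.Chars.startswith_iff, pv_append_prefix_iff]
            refine ⟨⟨r2, hr2⟩, ?_⟩
            rw [show ("www.".toList.length) = 4 from rfl, hdrop4]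
            exact (PySem.Chars.startswith_iff _ _).mp hb
        have hq : ('w' :: "ww.".toList) <+: r := by
          rw [← hr2]; exact ⟨r2, rfl⟩
        -- with a leading 'www.', the non-www patterns cannot match r ('d' ≠ 'w')
        have hd1 : PySem.Chars.startswith r "discord.com/api/webhooks/".toList = false := by
          rw [← Bool.not_eq_true, PySem.Chars.startswith_iff]
          intro hpre
          exact pv_prefix_disjoint (show 'd' ≠ 'w' by decide)
            (show ('d' :: "iscord.com/api/webhooks/".toList) <+: r from hpre) hq
        have hd2 : PySem.Chars.startswith r "discordapp.com/api/webhooks/".toList = false := by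
          rw [← Bool.not_eq_true, PySem.Chars.startswith_iff]
          intro hpre
          exact pv_prefix_disjoint (show 'd' ≠ 'w' by decide)
            (show ('d' :: "iscordapp.com/api/webhooks/".toList) <+: r from hpre) hq
        rw [show ("www.discord.com/api/webhooks/".toList)
              = "www.".toList ++ "discord.com/api/webhooks/".toList from rfl,
            show ("www.discordapp.com/api/webhooks/".toList)
              = "www.".toList ++ "discordapp.com/api/webhooks/".toList from rfl,
            hww, hww, hd1, hd2, hs4', hdrop4]
        simp only [Bool.false_or]
      case neg =>
        rw [if_neg hw]
        simp only [PySem.Str.toList_slice, PySem.Chars.slice_eq_listSlice]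
        rw [hs8, hdrop8]
        have hwfail : ∀ (q : List Char),
            PySem.Chars.startswith r ("www.".toList ++ q) = false := by
          intro q
          rw [← Bool.not_eq_true, PySem.Chars.startswith_iff, pv_append_prefix_iff]
          intro ⟨h1, _⟩
          exact hw ((PySem.Chars.startswith_iff _ _).mpr h1)
        rw [show ("www.discord.com/api/webhooks/".toList)
              = "www.".toList ++ "discord.com/api/webhooks/".toList from rfl,
            show ("www.discordapp.com/api/webhooks/".toList)
              = "www.".toList ++ "discordapp.com/api/webhooks/".toList from rfl,
            hwfail, hwfail]
        simp only [Bool.or_false, Bool.false_or]
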